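-- pv_equiv track=rewrite | github.com/JaiMehta04/lane-vehicle-detection | src/car_detection.py | _temporal_filter
-- ===== SOURCE A (Python) =====
-- def _do_overlap(box1, box2):
--     """Check whether two bounding boxes overlap."""
--     l1x, l1y = box1[0]
--     r1x, r1y = box1[1]
--     l2x, l2y = box2[0]
--     r2x, r2y = box2[1]
--     if l1x > r2x or l2x > r1x:
--         return False
--     if l1y > r2y or l2y > r1y:
--         return False
--     return True
--
-- def _temporal_filter(new_boxes, old_boxes):
--     """Keep only boxes that overlap with detections from the previous frame."""
--     if not old_boxes:
--         return new_boxes, new_boxes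
--
--     confirmed = []
--     for new_box in new_boxes:
--         if any(_do_overlap(new_box, old_box) for old_box in old_boxes):
--             confirmed.append(new_box)
--     return confirmed, new_boxes
-- ===== SOURCE B (Python) =====
-- def _overlaps(nb, ob):
--     (l1x, l1y), (r1x, r1y) = nb
--     (l2x, l2y), (r2x, r2y) = ob
--     return l1x <= r2x and l2x <= r1x and l1y <= r2y and l2y <= r1y
--
-- def _temporal_filter(new_boxes, old_boxes):
--     """Keep only boxes that overlap with detections from the previous frame."""
--     if not old_boxes:
--         return new_boxes, new_boxes
--
--     # Inverted traversal: sweep the OLD boxes once, marking which new boxes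
--     # they confirm; then emit the marked new boxes in their original order.
--     keep = [False] * len(new_boxes)
--     for ob in old_boxes:
--         keep = [k or _overlaps(nb, ob) for k, nb in zip(keep, new_boxes)]
--     confirmed = [nb for nb, k in zip(new_boxes, keep) if k]
--     return confirmed, new_boxes
-- ===== Notes on version B (the rewrite author's own statement) =====
-- stated objective: alternative
-- what changed: Inverts the loop nesting: instead of scanning all old boxes per new box with an early-exit any(), B sweeps the old boxes once over a boolean mark vector (one entry per new box, overlap written as a direct min/max comparison) and then emits the marked new boxes in order.
import Mathlib
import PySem

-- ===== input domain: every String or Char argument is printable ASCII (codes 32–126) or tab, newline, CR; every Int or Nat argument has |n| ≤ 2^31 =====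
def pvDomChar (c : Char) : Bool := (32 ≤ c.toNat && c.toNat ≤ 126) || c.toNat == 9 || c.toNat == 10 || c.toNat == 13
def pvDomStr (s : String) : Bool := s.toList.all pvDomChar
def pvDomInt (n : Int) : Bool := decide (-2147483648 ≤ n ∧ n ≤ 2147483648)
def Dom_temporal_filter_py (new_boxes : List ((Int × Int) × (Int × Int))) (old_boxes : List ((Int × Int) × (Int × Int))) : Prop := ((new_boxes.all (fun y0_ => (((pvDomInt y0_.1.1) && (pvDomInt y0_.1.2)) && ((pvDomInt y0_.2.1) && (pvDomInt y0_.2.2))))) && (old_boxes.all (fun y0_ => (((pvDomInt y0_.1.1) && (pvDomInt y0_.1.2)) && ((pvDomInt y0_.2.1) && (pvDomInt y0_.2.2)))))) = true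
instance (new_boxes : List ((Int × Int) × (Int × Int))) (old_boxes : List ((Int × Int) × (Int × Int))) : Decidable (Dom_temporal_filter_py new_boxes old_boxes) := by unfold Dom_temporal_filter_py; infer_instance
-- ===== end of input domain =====

-- B inverts A's loop nesting: one sweep over the old boxes updating a boolean mark
-- vector for the new boxes, then the marked new boxes are emitted in order (objective:
-- alternative structure, same asymptotic cost).

-- ===== PORT A =====
def do_overlap (box1 box2 : (Int × Int) × (Int × Int)) : Bool :=
  let l1x := box1.1.1; let l1y := box1.1.2
  let r1x := box1.2.1; let r1y := box1.2.2
  let l2x := box2.1.1; let l2y := box2.1.2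
  let r2x := box2.2.1; let r2y := box2.2.2
  if l1x > r2x || l2x > r1x then false
  else if l1y > r2y || l2y > r1y then false
  else true

def temporal_filter_py (new_boxes : List ((Int × Int) × (Int × Int))) (old_boxes : List ((Int × Int) × (Int × Int))) : (List ((Int × Int) × (Int × Int))) × (List ((Int × Int) × (Int × Int))) :=
  if old_boxes = [] then (new_boxes, new_boxes)
  else
    let confirmed := new_boxes.foldl
      (fun acc new_box =>
        if old_boxes.any (fun old_box => do_overlap new_box old_box) then acc ++ [new_box] else acc) []
    (confirmed, new_boxes)

-- ===== PORT B =====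
def overlaps_alt (nb ob : (Int × Int) × (Int × Int)) : Bool :=
  decide (nb.1.1 ≤ ob.2.1) && decide (ob.1.1 ≤ nb.2.1) && decide (nb.1.2 ≤ ob.2.2) && decide (ob.1.2 ≤ nb.2.2)

def temporal_filter_py_alt (new_boxes : List ((Int × Int) × (Int × Int))) (old_boxes : List ((Int × Int) × (Int × Int))) : (List ((Int × Int) × (Int × Int))) × (List ((Int × Int) × (Int × Int))) :=
  if old_boxes = [] then (new_boxes, new_boxes)
  else
    let keep0 : List Bool := List.replicate new_boxes.length false
    let keep := old_boxes.foldl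
      (fun k ob => List.zipWith (fun kk nb => kk || overlaps_alt nb ob) k new_boxes) keep0
    let confirmed := ((new_boxes.zip keep).filter (fun p => p.2)).map (fun p => p.1)
    (confirmed, new_boxes)

-- ===== PRECONDITION & SPEC =====
def Spec_temporal_filter_py (new_boxes : List ((Int × Int) × (Int × Int))) (old_boxes : List ((Int × Int) × (Int × Int))) (out : (List ((Int × Int) × (Int × Int))) × (List ((Int × Int) × (Int × Int)))) : Prop := out = temporal_filter_py_alt new_boxes old_boxes
instance (new_boxes : List ((Int × Int) × (Int × Int))) (old_boxes : List ((Int × Int) × (Int × Int))) (out : (List ((Int × Int) × (Int × Int))) × (List ((Int × Int) × (Int × Int)))) : Decidable (Spec_temporal_filter_py new_boxes old_boxes out) := by unfold Spec_temporal_filter_py; infer_instance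

-- ===== CLAIM (what is proved, stated in full; the proofs are below) =====
def Claim_equal_temporal_filter_py : Prop := ∀ (new_boxes : List ((Int × Int) × (Int × Int))) (old_boxes : List ((Int × Int) × (Int × Int))), Dom_temporal_filter_py new_boxes old_boxes → Spec_temporal_filter_py new_boxes old_boxes (temporal_filter_py new_boxes old_boxes)

-- ===== LEMMAS AND PROOFS =====

-- the two overlap tests agree
theorem do_overlap_eq (b o : (Int × Int) × (Int × Int)) : do_overlap b o = overlaps_alt b o := by
  rcases b with ⟨⟨a1, a2⟩, a3, a4⟩
  rcases o with ⟨⟨c1, c2⟩, c3, c4⟩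
  simp only [do_overlap, overlaps_alt]
  by_cases h1 : a1 ≤ c3 <;> by_cases h2 : c1 ≤ a3 <;> by_cases h3 : a2 ≤ c4 <;>
    by_cases h4 : c2 ≤ a4 <;> simp_all

-- zipWith with the identity-on-first function
theorem zipWith_fst_eq {α : Type} (k : List Bool) (ns : List α) (h : k.length = ns.length) :
    List.zipWith (fun kk (_ : α) => kk) k ns = k := by
  induction k generalizing ns with
  | nil => simp
  | cons a t ih =>
    cases ns with
    | nil => simp at h
    | cons b s => simp_all

-- fusing two positional updates
theorem zipWith_zipWith_fuse {α : Type} (f g : Bool → α → Bool) (k : List Bool) (ns : List α) :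
    List.zipWith g (List.zipWith f k ns) ns = List.zipWith (fun kk nb => g (f kk nb) nb) k ns := by
  induction k generalizing ns with
  | nil => simp
  | cons a t ih =>
    cases ns with
    | nil => simp
    | cons b s => simp [ih]

-- the sweep over old boxes computes, positionally, "already marked OR some old box overlaps"
theorem keep_foldl_eq (obs : List ((Int × Int) × (Int × Int))) (ns : List ((Int × Int) × (Int × Int)))
    (k : List Bool) (h : k.length = ns.length) :
    obs.foldl (fun k ob => List.zipWith (fun kk nb => kk || overlaps_alt nb ob) k ns) k
      = List.zipWith (fun kk nb => kk || obs.any (fun ob => overlaps_alt nb ob)) k ns := by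
  induction obs generalizing k with
  | nil =>
    simp only [List.foldl_nil, List.any_nil, Bool.or_false]
    exact (zipWith_fst_eq k ns h).symm
  | cons ob obs ih =>
    simp only [List.foldl_cons]
    rw [ih _ (by simp [h])]
    rw [zipWith_zipWith_fuse]
    simp [Bool.or_assoc]

-- zipWith over replicate false = map of the predicate
theorem zipWith_replicate_false (f : ((Int × Int) × (Int × Int)) → Bool)
    (ns : List ((Int × Int) × (Int × Int))) :
    List.zipWith (fun (kk : Bool) nb => kk || f nb) (List.replicate ns.length false) ns
      = ns.map f := by
  induction ns with
  | nil => simp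
  | cons b s ih => simpa [List.replicate_succ] using ih

-- selecting by the zipped mark vector is filtering by the predicate
theorem zip_map_filter (f : ((Int × Int) × (Int × Int)) → Bool)
    (ns : List ((Int × Int) × (Int × Int))) :
    ((ns.zip (ns.map f)).filter (fun p => p.2)).map (fun p => p.1) = ns.filter f := by
  induction ns with
  | nil => simp
  | cons b s ih =>
    by_cases h : f b <;> simp [h, ih]

-- ===== VERDICT (by name: the statement is the Claim_ definition above) =====
theorem temporal_filter_py_spec : Claim_equal_temporal_filter_py := by
  intro ns obs _
  unfold Spec_temporal_filter_py temporal_filter_py temporal_filter_py_alt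
  by_cases hobs : obs = []
  · simp [hobs]
  · simp only [hobs, if_false]
    rw [PySem.List.foldl_append_if_eq_filter]
    rw [keep_foldl_eq _ _ _ (by simp)]
    rw [zipWith_replicate_false, zip_map_filter]
    simp only [do_overlap_eq, List.nil_append]
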